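-- pv_equiv track=rewrite | github.com/parmoham-aws/test-repo-parmoham | examples/torch_compile/utils/validation.py | calculate_new_index
-- ===== SOURCE A (Python) =====
-- def calculate_new_index(original_index, removed_indices):
--     """
--     Calculate new index after removing elements from a tensor.
--
--     Args:
--         original_index: Index in original tensor
--         removed_indices: Tensor containing indices of removed elements (all items must be unique)
--
--     Returns:
--         new_index: Index in tensor after removal, or None if element was removed
--     """
--     if original_index in removed_indices:
--         return None
--
--     # Count how many elements were removed before this index
--     removed_before = 0
--     for removed_idx in removed_indices:
--         if removed_idx < original_index:
--             removed_before += 1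
--
--     new_index = original_index - removed_before
--     return new_index
-- ===== SOURCE B (Python) =====
-- def calculate_new_index(original_index, removed_indices):
--     # Sort the removed indices, then binary-search for original_index:
--     # the lower-bound position is exactly the number of removed indices
--     # below original_index, and an equal element at that position means
--     # original_index itself was removed.
--     s = sorted(removed_indices)
--     lo, hi = 0, len(s)
--     while lo < hi:
--         mid = (lo + hi) // 2
--         if s[mid] < original_index:
--             lo = mid + 1
--         else:
--             hi = mid
--     if lo < len(s) and s[lo] == original_index:
--         return None
--     return original_index - lo
-- ===== Notes on version B (the rewrite author's own statement) =====
-- stated objective: alternative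
-- what changed: Replaces A's linear membership scan and linear counting loop with sort-then-binary-search: a hand-written lower-bound binary search on the sorted removed indices yields the count of smaller elements, and an equal element at that position signals removal.
import Mathlib
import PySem

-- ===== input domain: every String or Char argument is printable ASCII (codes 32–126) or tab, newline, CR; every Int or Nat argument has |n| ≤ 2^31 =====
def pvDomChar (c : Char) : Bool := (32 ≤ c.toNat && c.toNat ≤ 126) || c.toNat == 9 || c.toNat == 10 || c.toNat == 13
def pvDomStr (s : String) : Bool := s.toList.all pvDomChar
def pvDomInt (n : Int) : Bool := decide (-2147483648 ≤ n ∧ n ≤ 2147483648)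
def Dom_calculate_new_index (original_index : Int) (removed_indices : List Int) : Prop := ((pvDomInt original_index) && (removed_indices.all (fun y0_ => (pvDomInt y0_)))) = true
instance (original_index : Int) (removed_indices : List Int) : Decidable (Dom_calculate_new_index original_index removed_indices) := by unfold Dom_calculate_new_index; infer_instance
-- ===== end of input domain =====

-- B replaces A's linear membership scan and counting loop with sort + lower-bound binary search; return-value equivalence proved below.
-- ===== PORT A =====
-- A: membership scan, then a count of removed indices below original_index
def calculate_new_index (original_index : Int) (removed_indices : List Int) : Option Int :=
  if removed_indices.contains original_index then
    none
  else
    some (original_index -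
      removed_indices.foldl (fun acc r => if r < original_index then acc + 1 else acc) 0)

-- ===== PORT B =====
-- B: lower-bound binary search on the sorted list; the index s[mid] is always
-- in range (0 ≤ lo ≤ mid < hi ≤ len s), so getD 0 is exact for Python's s[mid].
def cniSearch (s : List Int) (oi : Int) (lo hi : Nat) : Nat :=
  if lo < hi then
    let mid := (lo + hi) / 2
    if s.getD mid 0 < oi then cniSearch s oi (mid + 1) hi
    else cniSearch s oi lo mid
  else lo
termination_by hi - lo
decreasing_by all_goals omega

def calculate_new_index_alt (original_index : Int) (removed_indices : List Int) : Option Int :=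
  let s := PySem.List.sorted removed_indices (fun x => x) false
  let lo := cniSearch s original_index 0 s.length
  if lo < s.length ∧ s.getD lo 0 = original_index then none
  else some (original_index - (lo : Int))

-- ===== PRECONDITION & SPEC =====
def Spec_calculate_new_index (original_index : Int) (removed_indices : List Int) (out : Option Int) : Prop := out = calculate_new_index_alt original_index removed_indices
instance (original_index : Int) (removed_indices : List Int) (out : Option Int) : Decidable (Spec_calculate_new_index original_index removed_indices out) := by unfold Spec_calculate_new_index; infer_instance

-- ===== CLAIM (what is proved, stated in full; the proofs are below) =====
def Claim_equal_calculate_new_index : Prop := ∀ (original_index : Int) (removed_indices : List Int), Dom_calculate_new_index original_index removed_indices → Spec_calculate_new_index original_index removed_indices (calculate_new_index original_index removed_indices)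

-- ===== LEMMAS AND PROOFS =====

-- A's foldl counter equals the countP of elements below oi.
lemma cniFoldl_eq_countP (oi : Int) (l : List Int) (b : Int) :
    l.foldl (fun acc r => if r < oi then acc + 1 else acc) b
      = b + (l.countP (fun x => decide (x < oi)) : Int) := by
  induction l generalizing b with
  | nil => simp
  | cons x xs ih =>
    simp only [List.foldl_cons, List.countP_cons]
    rw [ih]
    by_cases h : x < oi
    · simp only [h, if_true, decide_true]
      push_cast; ring
    · simp only [h, if_false, decide_false]
      push_cast; ring

lemma cniGetD_mem {l : List Int} {i : Nat} (h : i < l.length) :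
    l.getD i 0 ∈ l := by
  rw [List.getD_eq_getElem l 0 h]
  exact List.getElem_mem h

-- In a (≤)-sorted list, the elements below oi form a prefix of length countP.
lemma cniSorted_getD_lt_iff (oi : Int) (s : List Int)
    (hs : s.Pairwise (fun a b => a ≤ b)) :
    ∀ i, i < s.length → (s.getD i 0 < oi ↔ i < s.countP (fun x => decide (x < oi))) := by
  induction s with
  | nil => intro i h; simp at h
  | cons x xs ih =>
    have hx := (List.pairwise_cons.mp hs).1
    have hxs := (List.pairwise_cons.mp hs).2
    intro i hi
    by_cases hlt : x < oi
    · cases i with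
      | zero => simp [hlt]
      | succ j =>
        have hj : j < xs.length := by simpa using hi
        simpa [hlt, Nat.succ_lt_succ_iff] using ih hxs j hj
    · have hall : ∀ y ∈ xs, ¬ y < oi := by
        intro y hy hylt
        exact hlt (lt_of_le_of_lt (hx y hy) hylt)
      have hc : (x :: xs).countP (fun x => decide (x < oi)) = 0 := by
        rw [List.countP_eq_zero]
        intro y hy
        rcases List.mem_cons.mp hy with rfl | hy'
        · simpa using hlt
        · simpa using hall y hy'
      rw [hc]
      cases i with
      | zero => simpa using hlt
      | succ j =>
        have hj : j < xs.length := by simpa using hi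
        constructor
        · intro h
          exact absurd h (hall _ (cniGetD_mem (by simpa using hi)))
        · omega

-- The binary search converges to c whenever the "< oi" elements are exactly the first c.
lemma cniSearch_eq (s : List Int) (oi : Int) (c : Nat)
    (hchar : ∀ i, i < s.length → (s.getD i 0 < oi ↔ i < c)) :
    ∀ n lo hi, hi - lo = n → lo ≤ c → c ≤ hi → hi ≤ s.length → cniSearch s oi lo hi = c := by
  intro n
  induction n using Nat.strong_induction_on with
  | _ n ih =>
    intro lo hi hn hlo hhi hlen
    rw [cniSearch]
    by_cases h : lo < hi
    · simp only [h, if_true]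
      have hmidlt : (lo + hi) / 2 < s.length := by omega
      by_cases hm : s.getD ((lo + hi) / 2) 0 < oi
      · have := (hchar _ hmidlt).mp hm
        simp only [hm, if_true]
        exact ih (hi - ((lo + hi) / 2 + 1)) (by omega) _ _ rfl (by omega) hhi hlen
      · have hcm : ¬ (lo + hi) / 2 < c := fun hc => hm ((hchar _ hmidlt).mpr hc)
        simp only [hm, if_false]
        exact ih ((lo + hi) / 2 - lo) (by omega) _ _ rfl hlo (by omega) (by omega)
    · simp only [h, if_false]
      omega

-- ===== VERDICT (by name: the statement is the Claim_ definition above) =====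
theorem calculate_new_index_spec : Claim_equal_calculate_new_index := by
  intro oi rs _
  unfold Spec_calculate_new_index calculate_new_index
  have hperm : (PySem.List.sorted rs (fun x => x) false).Perm rs := PySem.List.sorted_perm ..
  generalize hsdef : PySem.List.sorted rs (fun x => x) false = s at *
  have hpw : s.Pairwise (fun a b => a ≤ b) := by
    rw [← hsdef]
    simpa using PySem.List.sorted_pairwise rs (fun x => x)
  set c := s.countP (fun x => decide (x < oi)) with hcdef
  have hchar := cniSorted_getD_lt_iff oi s hpw
  have hclen : c ≤ s.length := List.countP_le_length ..
  have hsearch : cniSearch s oi 0 s.length = c :=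
    cniSearch_eq s oi c hchar _ 0 s.length rfl (Nat.zero_le _) hclen le_rfl
  have hcount : rs.countP (fun x => decide (x < oi)) = c :=
    (hperm.countP_eq _).symm
  have hmem : (c < s.length ∧ s.getD c 0 = oi) ↔ oi ∈ rs := by
    constructor
    · rintro ⟨hlt, heq⟩
      exact hperm.mem_iff.mp (heq ▸ cniGetD_mem hlt)
    · intro hoi
      have hoi' : oi ∈ s := hperm.mem_iff.mpr hoi
      obtain ⟨i, hi, hieq⟩ := List.getElem_of_mem hoi'
      have hiD : s.getD i 0 = oi := by rw [List.getD_eq_getElem s 0 hi, hieq]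
      have hic : ¬ i < c := by
        intro hic
        have := (hchar i hi).mpr hic
        rw [hiD] at this
        exact lt_irrefl _ this
      have hclen' : c < s.length := lt_of_le_of_lt (by omega) hi
      refine ⟨hclen', le_antisymm ?_ ?_⟩
      · calc s.getD c 0 = s[c] := List.getD_eq_getElem s 0 hclen'
          _ ≤ s[i] := by
              rcases Nat.lt_or_ge c i with h | h
              · exact List.pairwise_iff_getElem.mp hpw c i hclen' hi h
              · have : c = i := by omega
                subst this; exact le_rfl
          _ = oi := hieq
      · have : ¬ s.getD c 0 < oi := fun h => lt_irrefl c ((hchar c hclen').mp h)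
        omega
  have hB : calculate_new_index_alt oi rs
      = if c < s.length ∧ s.getD c 0 = oi then none else some (oi - (c : Int)) := by
    simp only [calculate_new_index_alt, hsdef, hsearch]
  rw [hB]
  by_cases hin : oi ∈ rs
  · rw [if_pos (by simpa using hin), if_pos (hmem.mpr hin)]
  · have h1 : rs.contains oi = false := by simpa using hin
    have hB2 : ¬ (c < s.length ∧ s.getD c 0 = oi) := fun h => hin (hmem.mp h)
    simp only [h1, Bool.false_eq_true, if_false, hB2]
    rw [cniFoldl_eq_countP, hcount]
    ring_nf
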